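-- pv_equiv track=rewrite | github.com/nez0b/bigdft-drug-design | bigdft/postprocessing/energy_calculation/BigQiskit.py | AS_to_FZ_RM_list
-- ===== SOURCE A (Python) =====
-- def AS_to_FZ_RM_list(norbc, norbs, AS_list):
--   """
--     Args:
--       norbc: Number of Occupied Spin Orbital
--       norbs: Number of Occupied and Virtual Spin Orbital
--       ASList: Active Space List (0-based Interleaved Spin Orbital Index)
--
--     Returns:
--       freeze_list (0-based Interleaved Spin Orbital Index)
--       remove_list (0-based Interleaved Spin Orbital Index)
--   """
--
--   # remove_list [ virtual orbital ]
--   remove_list=[]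
--   for i in range(norbc+1,norbs):
--     if i not in AS_list:
--       remove_list.append(i)
--
--   # freeze_list [ occupied orbital ]
--   freeze_list=[]
--   for i in range(norbc):
--     if i not in AS_list:
--       freeze_list.append(i)
--
--   return freeze_list, remove_list
-- ===== SOURCE B (Python) =====
-- def AS_to_FZ_RM_list(norbc, norbs, AS_list):
--     # Merge-sweep: walk the sorted distinct active indices once and emit the
--     # gap runs between consecutive marks, instead of testing each orbital index
--     # for membership in AS_list.
--     marks = sorted(set(AS_list))
--
--     def complement(lo, hi):
--         out = []
--         cur = lo
--         for m in marks:
--             if lo <= m < hi: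
--                 out.extend(range(cur, m))
--                 cur = m + 1
--         out.extend(range(cur, hi))
--         return out
--
--     return complement(0, norbc), complement(norbc + 1, norbs)
-- ===== Notes on version B (the rewrite author's own statement) =====
-- stated objective: faster
-- what changed: Replaces A's two filter loops (linear membership scan of AS_list per orbital index) with a merge-sweep: sort the distinct active indices once, then walk them emitting the gap runs of each range between consecutive marks.
import Mathlib
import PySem

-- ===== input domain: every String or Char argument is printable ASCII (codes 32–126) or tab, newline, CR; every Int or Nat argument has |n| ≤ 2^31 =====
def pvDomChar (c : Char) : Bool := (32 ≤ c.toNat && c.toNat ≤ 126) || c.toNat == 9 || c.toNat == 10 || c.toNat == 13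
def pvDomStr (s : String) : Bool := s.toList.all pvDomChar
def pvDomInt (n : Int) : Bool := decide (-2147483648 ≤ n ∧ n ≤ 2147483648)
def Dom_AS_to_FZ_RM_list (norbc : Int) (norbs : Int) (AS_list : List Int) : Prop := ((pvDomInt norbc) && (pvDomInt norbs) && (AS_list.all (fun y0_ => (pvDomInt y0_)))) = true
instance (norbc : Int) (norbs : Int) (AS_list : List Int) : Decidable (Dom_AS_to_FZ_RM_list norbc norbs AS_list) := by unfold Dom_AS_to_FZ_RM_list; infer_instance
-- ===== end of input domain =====

-- B replaces A's per-index membership scans by a single merge-sweep over the sorted distinct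
-- active indices, emitting the gap runs between consecutive marks (objective: faster).

-- ===== PORT A =====
def AS_to_FZ_RM_list (norbc : Int) (norbs : Int) (AS_list : List Int) : List Int × List Int :=
  let remove_list :=
    (PySem.List.pyRange (norbc + 1) norbs 1).foldl
      (fun acc i => if !(AS_list.contains i) then acc ++ [i] else acc) []
  let freeze_list :=
    (PySem.List.pyRange 0 norbc 1).foldl
      (fun acc i => if !(AS_list.contains i) then acc ++ [i] else acc) []
  (freeze_list, remove_list)

-- ===== PORT B =====
-- Source B's inner 'complement(lo, hi)': a fold over marks carrying (cur, out);
-- 'out.extend(range(cur, m))' is 'st.2 ++ pyRange st.1 m 1'.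
def pvComplement (marks : List Int) (lo : Int) (hi : Int) : List Int :=
  let st := marks.foldl
    (fun (st : Int × List Int) m =>
      if lo ≤ m ∧ m < hi then (m + 1, st.2 ++ PySem.List.pyRange st.1 m 1) else st)
    (lo, [])
  st.2 ++ PySem.List.pyRange st.1 hi 1

def AS_to_FZ_RM_list_alt (norbc : Int) (norbs : Int) (AS_list : List Int) : List Int × List Int :=
  let marks := PySem.List.sorted (PySem.Set.ofList AS_list) (fun x => x) false
  (pvComplement marks 0 norbc, pvComplement marks (norbc + 1) norbs)

-- ===== PRECONDITION & SPEC =====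
def Spec_AS_to_FZ_RM_list (norbc : Int) (norbs : Int) (AS_list : List Int) (out : List Int × List Int) : Prop := out = AS_to_FZ_RM_list_alt norbc norbs AS_list
instance (norbc : Int) (norbs : Int) (AS_list : List Int) (out : List Int × List Int) : Decidable (Spec_AS_to_FZ_RM_list norbc norbs AS_list out) := by unfold Spec_AS_to_FZ_RM_list; infer_instance

-- ===== CLAIM (what is proved, stated in full; the proofs are below) =====
def Claim_equal_AS_to_FZ_RM_list : Prop := ∀ (norbc : Int) (norbs : Int) (AS_list : List Int), Dom_AS_to_FZ_RM_list norbc norbs AS_list → Spec_AS_to_FZ_RM_list norbc norbs AS_list (AS_to_FZ_RM_list norbc norbs AS_list)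

-- ===== LEMMAS AND PROOFS =====

-- The sweep's fold only appends to the carried output list.
theorem pv_fold_prefix (marks : List Int) (lo hi c : Int) (o : List Int) :
    marks.foldl
      (fun (st : Int × List Int) m =>
        if lo ≤ m ∧ m < hi then (m + 1, st.2 ++ PySem.List.pyRange st.1 m 1) else st)
      (c, o)
    = ((marks.foldl
        (fun (st : Int × List Int) m =>
          if lo ≤ m ∧ m < hi then (m + 1, st.2 ++ PySem.List.pyRange st.1 m 1) else st)
        (c, [])).1,
       o ++ (marks.foldl
        (fun (st : Int × List Int) m =>
          if lo ≤ m ∧ m < hi then (m + 1, st.2 ++ PySem.List.pyRange st.1 m 1) else st)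
        (c, [])).2) := by
  induction marks generalizing c o with
  | nil => simp
  | cons m rest ih =>
    by_cases h : lo ≤ m ∧ m < hi
    · simp only [List.foldl_cons, if_pos h, List.nil_append]
      rw [ih (m + 1) (o ++ PySem.List.pyRange c m 1), ih (m + 1) (PySem.List.pyRange c m 1)]
      simp [List.append_assoc]
    · simp only [List.foldl_cons, if_neg h]
      exact ih c o

-- Core: on a strictly increasing mark list the sweep produces exactly the
-- filtered range that A's loop produces.
theorem pv_complement_eq_filter (marks : List Int) (hp : marks.Pairwise (· < ·))
    (lo hi : Int) :
    pvComplement marks lo hi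
      = (PySem.List.pyRange lo hi 1).filter (fun i => !(marks.contains i)) := by
  induction marks generalizing lo with
  | nil =>
    simp [pvComplement]
  | cons m rest ih =>
    rw [List.pairwise_cons] at hp
    by_cases h : lo ≤ m ∧ m < hi
    · have hsplit : PySem.List.pyRange lo hi 1
          = PySem.List.pyRange lo m 1 ++ (m :: PySem.List.pyRange (m + 1) hi 1) := by
        rw [PySem.List.pyRange_one_append lo m hi h.1 (le_of_lt h.2),
            PySem.List.pyRange_one_cons h.2]
      have hcongr : ∀ (st : Int × List Int) (x : Int), x ∈ rest →
          (if lo ≤ x ∧ x < hi then (x + 1, st.2 ++ PySem.List.pyRange st.1 x 1) else st)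
          = (if m + 1 ≤ x ∧ x < hi then (x + 1, st.2 ++ PySem.List.pyRange st.1 x 1) else st) := by
        intro st x hx
        have hmx := hp.1 x hx
        have hiff : (lo ≤ x ∧ x < hi) ↔ (m + 1 ≤ x ∧ x < hi) := by omega
        rw [if_congr hiff rfl rfl]
      have hleft : (PySem.List.pyRange lo m 1).filter
          (fun i => !((m :: rest).contains i)) = PySem.List.pyRange lo m 1 := by
        apply List.filter_eq_self.mpr
        intro x hx
        have hxm := (PySem.List.mem_pyRange_one.mp hx).2
        simp only [List.contains_cons, Bool.not_or, Bool.and_eq_true, Bool.not_eq_true',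
          beq_eq_false_iff_ne, ne_eq]
        constructor
        · omega
        · simp only [List.contains_eq_mem, decide_eq_false_iff_not]
          intro hmem
          exact absurd (hp.1 x hmem) (by omega)
      have hright : (PySem.List.pyRange (m + 1) hi 1).filter
          (fun i => !((m :: rest).contains i))
          = (PySem.List.pyRange (m + 1) hi 1).filter (fun i => !(rest.contains i)) := by
        apply List.filter_congr
        intro x hx
        have hxm := (PySem.List.mem_pyRange_one.mp hx).1
        simp only [List.contains_cons, Bool.not_or]
        have : (x == m) = false := by simp; omega
        rw [this]; simp
      have hmid : ((m :: PySem.List.pyRange (m + 1) hi 1).filter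
          (fun i => !((m :: rest).contains i)))
          = (PySem.List.pyRange (m + 1) hi 1).filter (fun i => !((m :: rest).contains i)) := by
        rw [List.filter_cons]
        simp
      rw [hsplit, List.filter_append, hleft, hmid, hright, ← ih hp.2 (m + 1)]
      simp only [pvComplement, List.foldl_cons, if_pos h, List.nil_append]
      rw [PySem.List.foldl_congr_mem rest
            (fun (st : Int × List Int) x =>
              if lo ≤ x ∧ x < hi then (x + 1, st.2 ++ PySem.List.pyRange st.1 x 1) else st)
            (fun (st : Int × List Int) x =>
              if m + 1 ≤ x ∧ x < hi then (x + 1, st.2 ++ PySem.List.pyRange st.1 x 1) else st)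
            (m + 1, PySem.List.pyRange lo m 1) (fun acc x hx => hcongr acc x hx),
          pv_fold_prefix]
      simp [List.append_assoc]
    · have hcong : (PySem.List.pyRange lo hi 1).filter
          (fun i => !((m :: rest).contains i))
          = (PySem.List.pyRange lo hi 1).filter (fun i => !(rest.contains i)) := by
        apply List.filter_congr
        intro x hx
        have hxr := PySem.List.mem_pyRange_one.mp hx
        simp only [List.contains_cons, Bool.not_or]
        have : (x == m) = false := by simp; omega
        rw [this]; simp
      rw [hcong, ← ih hp.2 lo]
      simp only [pvComplement, List.foldl_cons, if_neg h]

-- A's loop over range(a, b) equals B's sweep with marks = sorted(set(AS_list)).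
theorem pv_loop_eq_sweep (a b : Int) (AS_list : List Int) :
    (PySem.List.pyRange a b 1).foldl
      (fun acc i => if !(AS_list.contains i) then acc ++ [i] else acc) []
    = pvComplement (PySem.List.sorted (PySem.Set.ofList AS_list) (fun x => x) false) a b := by
  rw [PySem.List.foldl_append_if_eq_filter, List.nil_append,
      pv_complement_eq_filter _ (PySem.List.sorted_ofList_pairwise_lt AS_list) a b]
  apply List.filter_congr
  intro x _
  have : ((PySem.List.sorted (PySem.Set.ofList AS_list) (fun x => x) false).contains x)
      = (AS_list.contains x) := by
    simp [List.contains_eq_mem, PySem.List.mem_sorted, PySem.Set.mem_ofList]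
  rw [this]

-- ===== VERDICT (by name: the statement is the Claim_ definition above) =====
theorem AS_to_FZ_RM_list_spec : Claim_equal_AS_to_FZ_RM_list := by
  intro norbc norbs AS_list _
  unfold Spec_AS_to_FZ_RM_list AS_to_FZ_RM_list AS_to_FZ_RM_list_alt
  simp only [pv_loop_eq_sweep]
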